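-- pv_equiv track=rewrite | github.com/animeshokhade/dsa | scaler/Smallest XOR.py | solve
-- ===== SOURCE A (Python) =====
-- def solve(A, B):
--     x = 0
--     # iterate from the rightmost bits of A to find the set bit and mark
--     # it as 0 as this would make number as minimum as possible
--
--     for i in range(30, -1, -1):
--         if B == 0:
--             return x
--         if (1 << i) & A:
--             x |= 1 << i
--             B -= 1
--
--     # if number of set bits is less than B then start iterating from leftmost
--     # side and mark zeros with 1
--
--     for i in range(31):
--         if B == 0:
--             return x
--         if (1 << i) & x == 0:
--             x |= 1 << i
--             B -= 1
--
--     return x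
-- ===== SOURCE B (Python) =====
-- def solve(A, B):
--     m = A & 0x7FFFFFFF
--     ones = [i for i in range(31) if (m >> i) & 1]
--     if B <= len(ones):
--         keep = ones[len(ones) - B:]
--     else:
--         zeros = [i for i in range(31) if not ((m >> i) & 1)]
--         keep = ones + zeros[:B - len(ones)]
--     return sum(1 << i for i in keep)
-- ===== Notes on version B (the rewrite author's own statement) =====
-- stated objective: alternative
-- what changed: Instead of two early-return per-bit loops mutating an accumulator, B builds the lists of set and clear bit positions of A&0x7FFFFFFF once, selects the kept positions by list slicing (the B highest set positions, or all set positions plus the lowest missing zeros), and returns the sum of their powers of two.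
-- outside the precondition, e.g. on solve(5, -1): A returns 2147483647, B returns 0
import Mathlib
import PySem

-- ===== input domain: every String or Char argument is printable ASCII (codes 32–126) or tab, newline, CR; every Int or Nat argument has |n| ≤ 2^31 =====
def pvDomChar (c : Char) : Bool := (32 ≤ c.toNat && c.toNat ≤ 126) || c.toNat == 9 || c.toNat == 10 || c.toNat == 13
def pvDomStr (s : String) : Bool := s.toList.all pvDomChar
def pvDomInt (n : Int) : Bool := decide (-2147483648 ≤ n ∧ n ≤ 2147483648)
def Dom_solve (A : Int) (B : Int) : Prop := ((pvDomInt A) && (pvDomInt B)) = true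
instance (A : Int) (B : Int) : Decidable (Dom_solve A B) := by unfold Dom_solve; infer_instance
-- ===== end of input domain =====

-- B replaces A's two early-return per-bit loops by building the lists of set and clear bit
-- positions of A&0x7FFFFFFF once, selecting the kept positions by list slicing, and summing
-- their powers of two (objective: alternative decomposition, same cost).

-- ===== PORT A =====
def solveLoop1 (A : Int) : List Int → Int × Int → Int ⊕ (Int × Int)
  | [], s => .inr s
  | i :: is, (x, B) =>
    if B = 0 then .inl x
    else if PySem.Int.band ((1 : Int) <<< i.toNat) A ≠ 0 then
      solveLoop1 A is (PySem.Int.bor x ((1 : Int) <<< i.toNat), B - 1)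
    else
      solveLoop1 A is (x, B)

def solveLoop2 : List Int → Int × Int → Int ⊕ (Int × Int)
  | [], s => .inr s
  | i :: is, (x, B) =>
    if B = 0 then .inl x
    else if PySem.Int.band ((1 : Int) <<< i.toNat) x = 0 then
      solveLoop2 is (PySem.Int.bor x ((1 : Int) <<< i.toNat), B - 1)
    else
      solveLoop2 is (x, B)

def solve (A : Int) (B : Int) : Int :=
  match solveLoop1 A (PySem.List.pyRange 30 (-1) (-1)) (0, B) with
  | .inl r => r
  | .inr (x, B1) =>
    match solveLoop2 (PySem.List.pyRange 0 31 1) (x, B1) with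
    | .inl r => r
    | .inr (x2, _) => x2

-- ===== PORT B =====
def solve_alt (A : Int) (B : Int) : Int :=
  let m := PySem.Int.band A 2147483647
  let ones := (PySem.List.pyRange 0 31 1).filter
    (fun i => PySem.Int.band (m >>> i.toNat) 1 != 0)
  let keep :=
    if B ≤ PySem.List.len ones then
      PySem.List.slice ones (some (PySem.List.len ones - B)) none
    else
      let zeros := (PySem.List.pyRange 0 31 1).filter
        (fun i => !(PySem.Int.band (m >>> i.toNat) 1 != 0))
      ones ++ PySem.List.slice zeros none (some (B - PySem.List.len ones))
  (keep.map (fun i => (1 : Int) <<< i.toNat)).sum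

-- ===== PRECONDITION & SPEC =====
-- Pre_ excludes negative B (a negative requested bit count, outside the task's natural
-- domain), on which A's never-zero budget makes both loops run to exhaustion and
-- return 2147483647 by accident of the loop structure.
def Pre_solve (A : Int) (B : Int) : Prop := 0 ≤ B
instance (A : Int) (B : Int) : Decidable (Pre_solve A B) := by unfold Pre_solve; infer_instance
def pvWitness_solve : Int × Int := (5, 2)
def Spec_solve (A : Int) (B : Int) (out : Int) : Prop := out = solve_alt A B
instance (A : Int) (B : Int) (out : Int) : Decidable (Spec_solve A B out) := by unfold Spec_solve; infer_instance

-- ===== CLAIM (what is proved, stated in full; the proofs are below) =====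
def Claim_equal_solve : Prop := ∀ (A : Int) (B : Int), Dom_solve A B → Pre_solve A B → Spec_solve A B (solve A B)

-- ===== LEMMAS AND PROOFS =====

-- proof-side helpers
def run1 (A : Int) (l : List Int) (s : Int × Int) : Int × Int :=
  match solveLoop1 A l s with
  | .inl x => (x, 0)
  | .inr s => s

def run2 (l : List Int) (s : Int × Int) : Int × Int :=
  match solveLoop2 l s with
  | .inl x => (x, 0)
  | .inr s => s

def sumPow (l : List Nat) : Nat := (l.map (fun i => 2 ^ i)).sum

-- (1 : Int) <<< k is the natural-number power 2^k
lemma shl_one (k : Nat) : (1 : Int) <<< k = ((2 ^ k : Nat) : Int) := by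
  simp [Int.shiftLeft_eq]

-- disjoint OR is addition
lemma or_two_pow (x i : Nat) (h : x.testBit i = false) : x ||| 2 ^ i = x + 2 ^ i := by
  induction i generalizing x with
  | zero =>
    rw [← Nat.bit_testBit_zero_shiftRight_one x] at h ⊢
    rw [Nat.testBit_bit_zero] at h
    rw [h]
    have h1 : (2 : Nat) ^ 0 = Nat.bit true 0 := by simp [Nat.bit_val]
    rw [h1, Nat.lor_bit]
    simp [Nat.bit_val]
  | succ i ih =>
    rw [← Nat.bit_testBit_zero_shiftRight_one x] at h ⊢
    rw [Nat.testBit_bit_succ] at h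
    have h2 : (2 : Nat) ^ (i + 1) = Nat.bit false (2 ^ i) := by simp [Nat.bit_val]; ring
    rw [h2, Nat.lor_bit, ih _ h]
    simp [Nat.bit_val]; ring

-- a number below 2^w is the sum of the powers of two at its set bits
lemma sumPow_append (l1 l2 : List Nat) : sumPow (l1 ++ l2) = sumPow l1 + sumPow l2 := by
  simp [sumPow]

lemma sum_bits (w : Nat) : ∀ n : Nat, n < 2 ^ w →
    sumPow ((List.range w).filter n.testBit) = n := by
  induction w with
  | zero => intro n hn; interval_cases n; simp [sumPow]
  | succ w ih =>
    intro n hn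
    have hdm : 2 ^ w * (n / 2 ^ w) + n % 2 ^ w = n := Nat.div_add_mod n (2 ^ w)
    have hq : n / 2 ^ w < 2 := by
      have h2 : n < 2 ^ w * 2 := by rw [← pow_succ]; exact hn
      exact Nat.div_lt_of_lt_mul (by omega)
    have hfc : (List.range w).filter n.testBit = (List.range w).filter (n % 2 ^ w).testBit := by
      apply List.filter_congr
      intro i hi
      rw [List.mem_range] at hi
      simp [Nat.testBit_mod_two_pow, hi]
    have hr : sumPow ((List.range w).filter (n % 2 ^ w).testBit) = n % 2 ^ w :=
      ih _ (Nat.mod_lt _ (by positivity))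
    rw [List.range_succ, List.filter_append, hfc, sumPow_append, hr]
    have hbit : n.testBit w = decide (n / 2 ^ w % 2 = 1) :=
      Nat.testBit_eq_decide_div_mod_eq
    by_cases hb : n.testBit w
    · have hb2 := hb
      rw [hbit] at hb2
      have hb' : n / 2 ^ w % 2 = 1 := of_decide_eq_true hb2
      have h1 : n / 2 ^ w = 1 := by generalize hg : n / 2 ^ w = q at hb' hq; omega
      rw [h1] at hdm
      simp only [List.filter_cons, List.filter_nil, hb]
      simp [sumPow]
      omega
    · have hb' : ¬ (n / 2 ^ w % 2 = 1) := fun hc => hb (by rw [hbit]; exact decide_eq_true hc)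
      have h0 : n / 2 ^ w = 0 := by generalize hg : n / 2 ^ w = q at hb' hq; omega
      rw [h0] at hdm
      have hbf : n.testBit w = false := Bool.eq_false_iff.mpr hb
      simp only [List.filter_cons, List.filter_nil, hbf]
      simp [sumPow]
      omega

-- cast a list of bit positions to the Int list the ports traverse
def castL (l : List Nat) : List Int := l.map (fun i : Nat => (i : Int))

lemma castL_cons (i : Nat) (is : List Nat) : castL (i :: is) = (i : Int) :: castL is := rfl

lemma castL_nil : castL [] = [] := rfl

lemma sumPow_cons (i : Nat) (l : List Nat) : sumPow (i :: l) = 2 ^ i + sumPow l := by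
  simp [sumPow]

lemma castL_drop (l : List Nat) (i : Nat) : (castL l).drop i = castL (l.drop i) := by
  unfold castL; exact (List.map_drop).symm

lemma castL_take (l : List Nat) (i : Nat) : (castL l).take i = castL (l.take i) := by
  unfold castL; exact (List.map_take).symm

lemma castL_append (l1 l2 : List Nat) : castL l1 ++ castL l2 = castL (l1 ++ l2) := by
  unfold castL; exact (List.map_append ..).symm

lemma castL_length (l : List Nat) : (castL l).length = l.length := by
  unfold castL; exact List.length_map ..

lemma filter_castL (p : Int → Bool) (l : List Nat) :
    (castL l).filter p = castL (l.filter (fun j => p ((j : Nat) : Int))) := by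
  induction l with
  | nil => rfl
  | cons i is ih =>
    rw [castL_cons, List.filter_cons, List.filter_cons, ih]
    by_cases hp : p ((i : Nat) : Int)
    · rw [if_pos hp, if_pos hp, castL_cons]
    · rw [if_neg hp, if_neg hp]

-- one step of the flattened first loop
lemma run1_cons (A i : Int) (is : List Int) (x B : Int) :
    run1 A (i :: is) (x, B) =
      if B = 0 then (x, 0)
      else if PySem.Int.band ((1 : Int) <<< i.toNat) A ≠ 0 then
        run1 A is (PySem.Int.bor x ((1 : Int) <<< i.toNat), B - 1)
      else run1 A is (x, B) := by
  unfold run1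
  conv_lhs => rw [solveLoop1]
  split_ifs with h1 h2 <;> rfl

lemma run1_nil (A : Int) (s : Int × Int) : run1 A [] s = s := by
  cases s; rfl

-- one step of the flattened second loop
lemma run2_cons (i : Int) (is : List Int) (x B : Int) :
    run2 (i :: is) (x, B) =
      if B = 0 then (x, 0)
      else if PySem.Int.band ((1 : Int) <<< i.toNat) x = 0 then
        run2 is (PySem.Int.bor x ((1 : Int) <<< i.toNat), B - 1)
      else run2 is (x, B) := by
  unfold run2
  conv_lhs => rw [solveLoop2]
  split_ifs with h1 h2 <;> rfl

lemma run2_nil (s : Int × Int) : run2 [] s = s := by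
  cases s; rfl

-- characterization of A's first loop
lemma loop1_run (A : Int) (n : Nat) (l : List Nat) :
    ∀ (x : Nat) (B : Int), 0 ≤ B →
    (∀ i ∈ l, ((PySem.Int.band ((1 : Int) <<< i) A ≠ 0) ↔ n.testBit i)) →
    (∀ i ∈ l, x.testBit i = false) → l.Nodup →
    run1 A (castL l) ((x : Int), B) =
      (((x + sumPow ((l.filter n.testBit).take B.toNat) : Nat) : Int),
        B - ((min B.toNat (l.filter n.testBit).length : Nat) : Int)) := by
  induction l with
  | nil => intro x B hB _ _ _; rw [castL_nil, run1_nil]; simp [sumPow]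
  | cons i is ih =>
    intro x B hB ht hx hnd
    rcases List.nodup_cons.mp hnd with ⟨hni, hnd'⟩
    rw [castL_cons, run1_cons, Int.toNat_natCast]
    by_cases hB0 : B = 0
    · subst hB0
      simp [sumPow]
    · rw [if_neg hB0]
      have htn : (B.toNat) = (B - 1).toNat + 1 := by omega
      by_cases hbit : n.testBit i
      · have htest : PySem.Int.band ((1 : Int) <<< i) A ≠ 0 := (ht i (by simp)).mpr hbit
        rw [if_pos htest]
        have hor : PySem.Int.bor (x : Int) ((1 : Int) <<< i) = ((x + 2 ^ i : Nat) : Int) := by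
          rw [shl_one, PySem.Int.bor_natCast, or_two_pow x i (hx i (by simp))]
        rw [hor, ih (x + 2 ^ i) (B - 1) (by omega)
          (fun j hj => ht j (by simp [hj]))
          (fun j hj => by
            rw [← or_two_pow x i (hx i (by simp)), Nat.testBit_lor, hx j (by simp [hj]),
              Nat.testBit_two_pow_of_ne (fun he => hni (by rw [he]; exact hj))]
            rfl) hnd']
        have hfc : (i :: is).filter n.testBit = i :: is.filter n.testBit := by
          simp [List.filter_cons, hbit]
        rw [hfc, htn, List.take_succ_cons, sumPow_cons]
        rw [Prod.mk.injEq]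
        constructor
        · push_cast; ring
        · simp only [List.length_cons]; omega
      · have hbf : n.testBit i = false := Bool.eq_false_iff.mpr hbit
        have htest : ¬ (PySem.Int.band ((1 : Int) <<< i) A ≠ 0) := fun hc => by
          rw [ht i (by simp)] at hc; rw [hbf] at hc; exact Bool.false_ne_true hc
        rw [if_neg htest, ih x B hB (fun j hj => ht j (by simp [hj]))
          (fun j hj => hx j (by simp [hj])) hnd']
        have hfc : (i :: is).filter n.testBit = is.filter n.testBit := by
          simp [List.filter_cons, hbf]
        rw [hfc]

-- characterization of A's second loop
lemma loop2_run (l : List Nat) :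
    ∀ (x : Nat) (B : Int), 0 ≤ B → l.Nodup →
    run2 (castL l) ((x : Int), B) =
      (((x + sumPow ((l.filter (fun j => ! x.testBit j)).take B.toNat) : Nat) : Int),
        B - ((min B.toNat (l.filter (fun j => ! x.testBit j)).length : Nat) : Int)) := by
  induction l with
  | nil => intro x B hB _; rw [castL_nil, run2_nil]; simp [sumPow]
  | cons i is ih =>
    intro x B hB hnd
    rcases List.nodup_cons.mp hnd with ⟨hni, hnd'⟩
    rw [castL_cons, run2_cons, Int.toNat_natCast]
    by_cases hB0 : B = 0
    · subst hB0
      simp [sumPow]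
    · rw [if_neg hB0]
      have htn : (B.toNat) = (B - 1).toNat + 1 := by omega
      have hband : PySem.Int.band ((1 : Int) <<< i) ((x : Nat) : Int) =
          ((2 ^ i * (x.testBit i).toNat : Nat) : Int) := by
        rw [shl_one, PySem.Int.band_natCast, Nat.two_pow_and]
      by_cases hbit : x.testBit i
      · have htest : ¬ PySem.Int.band ((1 : Int) <<< i) ((x : Nat) : Int) = 0 := by
          rw [hband, hbit]
          simp
        rw [if_neg htest, ih x B hB hnd']
        have hfc : (i :: is).filter (fun j => ! x.testBit j) =
            is.filter (fun j => ! x.testBit j) := by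
          simp [List.filter_cons, hbit]
        rw [hfc]
      · have hbf : x.testBit i = false := Bool.eq_false_iff.mpr hbit
        have htest : PySem.Int.band ((1 : Int) <<< i) ((x : Nat) : Int) = 0 := by
          rw [hband, hbf]; simp
        rw [if_pos htest]
        have hor : PySem.Int.bor (x : Int) ((1 : Int) <<< i) = ((x + 2 ^ i : Nat) : Int) := by
          rw [shl_one, PySem.Int.bor_natCast, or_two_pow x i hbf]
        have hbits : ∀ j ∈ is, (x + 2 ^ i).testBit j = x.testBit j := by
          intro j hj
          rw [← or_two_pow x i hbf, Nat.testBit_lor,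
            Nat.testBit_two_pow_of_ne (fun he => hni (by rw [he]; exact hj))]
          simp
        have hfc2 : is.filter (fun j => ! (x + 2 ^ i).testBit j) =
            is.filter (fun j => ! x.testBit j) := by
          apply List.filter_congr
          intro j hj
          rw [hbits j hj]
        rw [hor, ih (x + 2 ^ i) (B - 1) (by omega) hnd', hfc2]
        have hfc : (i :: is).filter (fun j => ! x.testBit j) =
            i :: is.filter (fun j => ! x.testBit j) := by
          simp [List.filter_cons, hbf]
        rw [hfc, htn, List.take_succ_cons, sumPow_cons]
        rw [Prod.mk.injEq]
        constructor
        · push_cast; ring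
        · simp only [List.length_cons]; omega

-- the masked value of A as a natural number
def nOf (A : Int) : Nat := (PySem.Int.band A 2147483647).toNat

lemma nOf_cast (A : Int) : ((nOf A : Nat) : Int) = PySem.Int.band A 2147483647 := by
  apply Int.toNat_of_nonneg
  rw [PySem.Int.band_comm]
  exact PySem.Int.band_nonneg_of_nonneg_left A (by omega)

lemma nOf_neg (A : Int) (hA : A < 0) :
    nOf A = 2 ^ 31 - ((-A - 1).toNat % 2 ^ 31 + 1) := by
  have h1 : ¬ (0 ≤ A) := by omega
  have h1' : (0 : Int) ≤ 2147483647 := by norm_num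
  have h2 : ((2147483647 : Int)).toNat = 2 ^ 31 - 1 := by decide
  rw [nOf, PySem.Int.band, if_neg h1, if_pos h1', Int.toNat_natCast, h2,
      Nat.land_comm, Nat.and_two_pow_sub_one_eq_mod]
  have := Nat.mod_lt (-A - 1).toNat (show 0 < 2 ^ 31 by norm_num)
  omega

lemma nOf_testBit_neg (A : Int) (hA : A < 0) (i : Nat) (hi : i < 31) :
    (nOf A).testBit i = ! ((-A - 1).toNat).testBit i := by
  rw [nOf_neg A hA, Nat.testBit_two_pow_sub_succ (Nat.mod_lt _ (by norm_num)) i,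
    Nat.testBit_mod_two_pow]
  simp [hi]

lemma nOf_pos_testBit (A : Int) (hA : 0 ≤ A) (i : Nat) (hi : i < 31) :
    (nOf A).testBit i = A.toNat.testBit i := by
  obtain ⟨a, rfl⟩ := Int.eq_ofNat_of_zero_le hA
  have h2 : (2147483647 : Int) = ((2 ^ 31 - 1 : Nat) : Int) := by norm_num
  simp only [nOf, h2, PySem.Int.band_natCast, Int.toNat_natCast]
  rw [Nat.testBit_and, Nat.testBit_two_pow_sub_one]
  simp [hi]

lemma nOf_lt (A : Int) : nOf A < 2 ^ 31 := by
  by_cases hA : 0 ≤ A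
  · obtain ⟨a, rfl⟩ := Int.eq_ofNat_of_zero_le hA
    have h2 : (2147483647 : Int) = ((2 ^ 31 - 1 : Nat) : Int) := by norm_num
    simp only [nOf, h2, PySem.Int.band_natCast, Int.toNat_natCast]
    have := Nat.and_le_right (n := a) (m := 2 ^ 31 - 1)
    omega
  · rw [nOf_neg A (by omega)]
    omega

-- A's per-bit test reads exactly bit i of the masked value
lemma testA_iff (A : Int) (i : Nat) (hi : i < 31) :
    (PySem.Int.band ((1 : Int) <<< i) A ≠ 0) ↔ (nOf A).testBit i := by
  rw [shl_one]
  by_cases hA : 0 ≤ A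
  · obtain ⟨a, rfl⟩ := Int.eq_ofNat_of_zero_le hA
    rw [nOf_pos_testBit _ hA i hi]
    rw [PySem.Int.band_natCast, Nat.two_pow_and, Int.toNat_natCast]
    cases hc : a.testBit i
    · simp
    · simp
  · have hA' : A < 0 := by omega
    have h0 : (0 : Int) ≤ ((2 ^ i : Nat) : Int) := by positivity
    rw [nOf_testBit_neg A hA' i hi]
    unfold PySem.Int.band
    rw [if_pos h0, if_neg hA, Int.toNat_natCast, Nat.two_pow_and]
    cases hc : ((-A - 1).toNat).testBit i
    · simp
    · simp

-- B's per-bit test reads exactly bit i of the masked value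
lemma testB_iff (n : Nat) (i : Nat) :
    ((PySem.Int.band ((n : Int) >>> ((i : Nat) : Int)) 1 != 0) = true) ↔ n.testBit i := by
  have hsr : ((n : Int) >>> ((i : Nat) : Int)) = ((n >>> i : Nat) : Int) := Int.shiftRight_natCast n i
  have h1 : (1 : Int) = ((1 : Nat) : Int) := rfl
  rw [hsr, h1, PySem.Int.band_natCast, Nat.and_one_is_mod, Nat.shiftRight_eq_div_pow]
  have hbit : n.testBit i = decide (n / 2 ^ i % 2 = 1) := Nat.testBit_eq_decide_div_mod_eq
  rw [hbit]
  constructor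
  · intro h
    simp only [bne_iff_ne, ne_eq] at h
    have : n / 2 ^ i % 2 = 1 := by
      generalize hg : n / 2 ^ i = q at h
      have : ¬ ((q % 2 : Nat) : Int) = 0 := h
      omega
    exact decide_eq_true this
  · intro h
    have h' : n / 2 ^ i % 2 = 1 := of_decide_eq_true h
    simp only [bne_iff_ne, ne_eq, h']
    omega

-- the two literal ranges
lemma range_desc : PySem.List.pyRange 30 (-1) (-1) = castL ((List.range 31).reverse) := by decide
lemma range_asc : PySem.List.pyRange 0 31 1 = castL (List.range 31) := by decide

-- solve as the composition of the two flattened loops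
lemma solve_eq_runs (A B : Int) :
    solve A B = (run2 (PySem.List.pyRange 0 31 1)
      (run1 A (PySem.List.pyRange 30 (-1) (-1)) (0, B))).1 := by
  unfold solve
  rcases h : solveLoop1 A (PySem.List.pyRange 30 (-1) (-1)) (0, B) with x | ⟨x, B1⟩
  · have h1 : run1 A (PySem.List.pyRange 30 (-1) (-1)) (0, B) = (x, 0) := by
      unfold run1; rw [h]
    rw [h1]
    have hcons : PySem.List.pyRange 0 31 1 = 0 :: PySem.List.pyRange 1 31 1 :=
      PySem.List.pyRange_one_cons (by norm_num)
    rw [hcons, run2_cons, if_pos rfl]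
  · have h1 : run1 A (PySem.List.pyRange 30 (-1) (-1)) (0, B) = (x, B1) := by
      unfold run1; rw [h]
    rw [h1]
    unfold run2
    rcases h2 : solveLoop2 (PySem.List.pyRange 0 31 1) (x, B1) with y | ⟨y, B2⟩ <;>
      simp only [h2]

-- reversed take as drop
lemma sumPow_rev_take (l : List Nat) (b : Nat) :
    sumPow (l.reverse.take b) = sumPow (l.drop (l.length - b)) := by
  rw [List.take_reverse]
  simp [sumPow, List.map_reverse, List.sum_reverse]

-- cast sum of shifted powers
lemma sum_shl_map (l : List Nat) :
    ((castL l).map (fun i => (1 : Int) <<< i.toNat)).sum = ((sumPow l : Nat) : Int) := by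
  induction l with
  | nil => rfl
  | cons i is ih =>
    rw [castL_cons, List.map_cons, List.sum_cons, ih]
    simp only [Int.toNat_natCast, Int.one_shiftLeft, sumPow_cons]
    push_cast
    ring

lemma sumPow_reverse (l : List Nat) : sumPow l.reverse = sumPow l := by
  simp [sumPow, List.map_reverse, List.sum_reverse]

-- closed form of B's computation
lemma alt_eval (A B : Int) (hB : 0 ≤ B) :
    solve_alt A B =
      (if B.toNat ≤ ((List.range 31).filter (nOf A).testBit).length then
        ((sumPow (((List.range 31).filter (nOf A).testBit).drop
            (((List.range 31).filter (nOf A).testBit).length - B.toNat)) : Nat) : Int)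
      else
        ((sumPow ((List.range 31).filter (nOf A).testBit)
          + sumPow (((List.range 31).filter (fun j => ! (nOf A).testBit j)).take
              (B.toNat - ((List.range 31).filter (nOf A).testBit).length)) : Nat) : Int)) := by
  have hm : PySem.Int.band A 2147483647 = ((nOf A : Nat) : Int) := (nOf_cast A).symm
  set n : Nat := nOf A with hn
  set ones : List Nat := (List.range 31).filter n.testBit with hones
  set zeros : List Nat := (List.range 31).filter (fun j => ! n.testBit j) with hzeros
  set k : Nat := ones.length with hk
  set b : Nat := B.toNat with hbdef
  have hBb : ((b : Nat) : Int) = B := Int.toNat_of_nonneg hB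
  have hfilt : ∀ (p : Int → Bool),
      (∀ j : Nat, j < 31 → p ((j : Nat) : Int) = n.testBit j) →
      (PySem.List.pyRange 0 31 1).filter p = castL ones := by
    intro p hp
    have hc : (List.range 31).filter (fun j => p ((j : Nat) : Int)) = ones := by
      rw [hones]
      exact List.filter_congr (fun j hj => hp j (List.mem_range.mp hj))
    rw [range_asc, filter_castL, hc]
  have hfiltz : ∀ (p : Int → Bool),
      (∀ j : Nat, j < 31 → p ((j : Nat) : Int) = ! n.testBit j) →
      (PySem.List.pyRange 0 31 1).filter p = castL zeros := by
    intro p hp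
    have hc : (List.range 31).filter (fun j => p ((j : Nat) : Int)) = zeros := by
      rw [hzeros]
      exact List.filter_congr (fun j hj => hp j (List.mem_range.mp hj))
    rw [range_asc, filter_castL, hc]
  have hptest : ∀ j : Nat,
      (PySem.Int.band (((n : Nat) : Int) >>> ((((j : Nat) : Int)).toNat : Int)) 1 != 0) = n.testBit j := by
    intro j
    rw [Int.toNat_natCast]
    exact Bool.eq_iff_iff.mpr ⟨fun h => (testB_iff n j).mp h, fun h => (testB_iff n j).mpr h⟩
  simp only [solve_alt, hm]
  have h1 : ((PySem.List.pyRange 0 31 1).filter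
      (fun i => PySem.Int.band (((n : Nat) : Int) >>> i.toNat) 1 != 0)) = castL ones :=
    hfilt _ (fun j _ => hptest j)
  have h2 : ((PySem.List.pyRange 0 31 1).filter
      (fun i => !(PySem.Int.band (((n : Nat) : Int) >>> i.toNat) 1 != 0))) = castL zeros :=
    hfiltz _ (fun j _ => by rw [hptest j])
  rw [h1, h2]
  have hlen : PySem.List.len (castL ones) = ((k : Nat) : Int) := by
    rw [PySem.List.len_eq, castL_length]
  rw [hlen]
  have hcond : (B ≤ ((k : Nat) : Int)) ↔ b ≤ k := by omega
  by_cases hbk : b ≤ k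
  · rw [if_pos (hcond.mpr hbk), if_pos hbk]
    have hsub : ((k : Nat) : Int) - B = (((k - b : Nat) : Nat) : Int) := by omega
    rw [hsub, PySem.List.slice_from_natCast, castL_drop]
    exact sum_shl_map (ones.drop (k - b))
  · rw [if_neg (fun hc => hbk (hcond.mp hc)), if_neg hbk]
    have hsub : B - ((k : Nat) : Int) = (((b - k : Nat) : Nat) : Int) := by omega
    rw [hsub, PySem.List.slice_to_natCast, castL_take, castL_append,
      sum_shl_map (ones ++ zeros.take (b - k)), sumPow_append]

-- ===== VERDICT (by name: the statement is the Claim_ definition above) =====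
theorem solve_spec : Claim_equal_solve := by
  intro A B _ hPre
  unfold Spec_solve
  have hB : (0 : Int) ≤ B := hPre
  set n : Nat := nOf A with hn
  have hlt : n < 2 ^ 31 := nOf_lt A
  set b : Nat := B.toNat with hbdef
  have hBb : ((b : Nat) : Int) = B := Int.toNat_of_nonneg hB
  set ones : List Nat := (List.range 31).filter n.testBit with hones
  set zeros : List Nat := (List.range 31).filter (fun j => ! n.testBit j) with hzeros
  set k : Nat := ones.length with hk
  -- A's first loop
  have hA1 : run1 A (PySem.List.pyRange 30 (-1) (-1)) ((0 : Int), B) =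
      (((sumPow (ones.reverse.take b) : Nat) : Int), B - ((min b k : Nat) : Int)) := by
    rw [range_desc]
    have h0 := loop1_run A n ((List.range 31).reverse) 0 B hB
      (fun i hi => testA_iff A i (by rw [List.mem_reverse, List.mem_range] at hi; exact hi))
      (fun i _ => Nat.zero_testBit i)
      (List.nodup_reverse.mpr (List.nodup_range))
    rw [show (((0 : Nat) : Nat) : Int) = (0 : Int) from rfl] at h0
    rw [h0, List.filter_reverse, List.length_reverse]
    rw [Nat.zero_add]
  rw [solve_eq_runs, hA1, alt_eval A B hB]
  by_cases hbk : b ≤ k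
  · rw [if_pos hbk]
    have hz : B - ((min b k : Nat) : Int) = 0 := by
      rw [min_eq_left hbk]; omega
    rw [hz, range_asc,
      loop2_run (List.range 31) (sumPow (ones.reverse.take b)) 0 le_rfl List.nodup_range]
    simp only [Int.toNat_zero, List.take_zero]
    rw [show sumPow [] = 0 from rfl, Nat.add_zero]
    rw [sumPow_rev_take]
  · rw [if_neg hbk]
    have hkb : k < b := by omega
    have htk : ones.reverse.take b = ones.reverse := by
      apply List.take_of_length_le
      rw [List.length_reverse]
      omega
    have hx1 : sumPow (ones.reverse.take b) = n := by
      rw [htk, sumPow_reverse, hones]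
      exact sum_bits 31 n hlt
    have hmin : B - ((min b k : Nat) : Int) = (((b - k : Nat) : Nat) : Int) := by
      rw [min_eq_right (le_of_lt hkb)]; omega
    rw [hx1, hmin, range_asc,
      loop2_run (List.range 31) n ((b - k : Nat) : Int) (by positivity) List.nodup_range]
    rw [Int.toNat_natCast]
    have hsb : sumPow ones = n := by rw [hones]; exact sum_bits 31 n hlt
    rw [← hn, hsb]
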